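-- pv_equiv track=rewrite | github.com/ram677/gfg_pod | Problem_of_the_Day/trail_of_ones.py | countConsec
-- ===== SOURCE A (Python) =====
-- def countConsec(n: int) -> int:
--     if n < 2:
--         return 0
--
--     # Initialize DP arrays
--     a = [0] * (n + 1)  # ends with 0
--     b = [0] * (n + 1)  # ends with 1
--
--     a[1] = 1
--     b[1] = 1
--
--     for i in range(2, n + 1):
--         a[i] = a[i-1] + b[i-1]
--         b[i] = a[i-1]
--
--     # Total strings with no consecutive 1s
--     no_consec_ones = a[n] + b[n]
--
--     # Total binary strings of length n = 2^n
--     total = 1 << n  # same as 2 ** n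
--
--     # Result = total - no_consec_ones
--     return total - no_consec_ones
-- ===== SOURCE B (Python) =====
-- def countConsec(n: int) -> int:
--     if n < 2:
--         return 0
--
--     def fib_pair(k: int):
--         # returns (F(k), F(k+1)) by fast doubling
--         if k == 0:
--             return (0, 1)
--         a, b = fib_pair(k >> 1)
--         c = a * (2 * b - a)       # F(2m)
--         d = a * a + b * b         # F(2m+1)
--         if k & 1:
--             return (d, c + d)
--         return (c, d)
--
--     # strings with no two consecutive 1s of length n = F(n+2)
--     return (1 << n) - fib_pair(n + 2)[0]
-- ===== Notes on version B (the rewrite author's own statement) =====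
-- stated objective: faster
-- what changed: Replaces the O(n) DP over two length-(n+1) arrays by fast-doubling Fibonacci (no_consec_ones = F(n+2)), computing the answer 2^n - F(n+2) in O(log n) multiplications.
import Mathlib
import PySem

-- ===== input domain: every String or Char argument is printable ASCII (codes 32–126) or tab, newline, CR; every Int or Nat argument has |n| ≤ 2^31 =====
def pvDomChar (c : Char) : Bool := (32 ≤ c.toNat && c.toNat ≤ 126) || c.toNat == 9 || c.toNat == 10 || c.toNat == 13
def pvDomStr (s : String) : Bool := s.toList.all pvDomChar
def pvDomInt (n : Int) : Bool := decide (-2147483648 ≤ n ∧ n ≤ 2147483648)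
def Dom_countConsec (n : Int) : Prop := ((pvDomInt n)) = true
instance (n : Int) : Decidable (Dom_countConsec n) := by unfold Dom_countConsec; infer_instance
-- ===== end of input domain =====

-- B replaces A's O(n) two-array DP by fast-doubling Fibonacci (no_consec_ones = F(n+2)),
-- computing 2^n - F(n+2) in O(log n) multiplications; objective: faster (asymptotic).

-- ===== PORT A =====
-- loop body of 'for i in range(2, n+1)': a[i] = a[i-1] + b[i-1]; b[i] = a[i-1]
def pvStepA (st : List Int × List Int) (i : Int) : List Int × List Int :=
  let av := PySem.List.pyGetD st.1 (i - 1) 0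
  let bv := PySem.List.pyGetD st.2 (i - 1) 0
  (PySem.List.pySetD st.1 i (av + bv), PySem.List.pySetD st.2 i av)

def countConsec (n : Int) : Int :=
  if n < 2 then 0
  else
    let a0 : List Int := List.replicate (n + 1).toNat 0
    let b0 : List Int := List.replicate (n + 1).toNat 0
    let a1 := PySem.List.pySetD a0 1 1
    let b1 := PySem.List.pySetD b0 1 1
    let st := (PySem.List.pyRange 2 (n + 1) 1).foldl pvStepA (a1, b1)
    let noConsecOnes := PySem.List.pyGetD st.1 n 0 + PySem.List.pyGetD st.2 n 0
    let total : Int := 1 <<< n.toNat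
    total - noConsecOnes

-- ===== PORT B =====
-- fast doubling: fibPair k = (F(k), F(k+1))
def fibPair (k : Nat) : Int × Int :=
  if h : k = 0 then (0, 1)
  else
    let p := fibPair (k / 2)
    let c := p.1 * (2 * p.2 - p.1)
    let d := p.1 * p.1 + p.2 * p.2
    if k % 2 = 1 then (d, c + d) else (c, d)
decreasing_by exact Nat.div_lt_self (Nat.pos_of_ne_zero h) (by omega)

def countConsec_alt (n : Int) : Int :=
  if n < 2 then 0
  else (1 <<< n.toNat) - (fibPair (n + 2).toNat).1

-- ===== PRECONDITION & SPEC =====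
def Spec_countConsec (n : Int) (out : Int) : Prop := out = countConsec_alt n
instance (n : Int) (out : Int) : Decidable (Spec_countConsec n out) := by unfold Spec_countConsec; infer_instance

-- ===== CLAIM (what is proved, stated in full; the proofs are below) =====
def Claim_equal_countConsec : Prop := ∀ (n : Int), Dom_countConsec n → Spec_countConsec n (countConsec n)

-- ===== LEMMAS AND PROOFS =====

theorem fibPair_eq (k : Nat) : fibPair k = ((Nat.fib k : Int), (Nat.fib (k + 1) : Int)) := by
  induction k using Nat.strong_induction_on with
  | _ k ih =>
    by_cases h : k = 0
    · subst h; simp [fibPair]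
    · have hm : k / 2 < k := Nat.div_lt_self (Nat.pos_of_ne_zero h) (by omega)
      rw [fibPair, dif_neg h, ih _ hm]
      have hle : Nat.fib (k / 2) ≤ Nat.fib (k / 2 + 1) := Nat.fib_le_fib_succ
      set m := k / 2 with hmdef
      have h2 : Nat.fib m ≤ 2 * Nat.fib (m + 1) := le_trans hle (by omega)
      have hc : ((Nat.fib m : Int)) * (2 * (Nat.fib (m + 1) : Int) - (Nat.fib m : Int))
          = (Nat.fib (2 * m) : Int) := by
        rw [Nat.fib_two_mul]
        push_cast [h2]
        ring
      have hd : ((Nat.fib m : Int)) * (Nat.fib m : Int) + (Nat.fib (m + 1) : Int) * (Nat.fib (m + 1) : Int)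
          = (Nat.fib (2 * m + 1) : Int) := by
        rw [Nat.fib_two_mul_add_one]
        push_cast
        ring
      by_cases hodd : k % 2 = 1
      · have hk : k = 2 * m + 1 := by omega
        simp only [if_pos hodd]
        rw [hk]
        refine Prod.ext ?_ ?_
        · simpa using hd
        · show _ * (2 * _ - _) + (_ * _ + _ * _) = (Nat.fib (2 * m + 1 + 1) : Int)
          rw [show Nat.fib (2 * m + 1 + 1) = Nat.fib (2 * m) + Nat.fib (2 * m + 1) from Nat.fib_add_two]
          push_cast
          rw [← hc, ← hd]
      · have hk : k = 2 * m := by omega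
        simp only [if_neg hodd]
        rw [hk]
        exact Prod.ext (by simpa using hc) (by simpa using hd)

-- invariant of A's DP loop: after processing range(2, j+1) the arrays have length n+1 and
-- a[j] = F(j+1), b[j] = F(j)
theorem pvLoopA_inv (n : Int) (hn : 2 ≤ n) (j : Int) (h1 : 1 ≤ j) (hj : j ≤ n) :
    let a1 := PySem.List.pySetD (List.replicate (n + 1).toNat (0 : Int)) 1 1
    let b1 := PySem.List.pySetD (List.replicate (n + 1).toNat (0 : Int)) 1 1
    let st := (PySem.List.pyRange 2 (j + 1) 1).foldl pvStepA (a1, b1)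
    st.1.length = (n + 1).toNat ∧ st.2.length = (n + 1).toNat ∧
      PySem.List.pyGetD st.1 j 0 = (Nat.fib (j.toNat + 1) : Int) ∧
      PySem.List.pyGetD st.2 j 0 = (Nat.fib j.toNat : Int) := by
  intro a1 b1
  induction j, h1 using Int.le_induction with
  | base =>
    have hrange : PySem.List.pyRange 2 (1 + 1) 1 = [] := PySem.List.pyRange_one_eq_nil (by omega)
    simp only [hrange, List.foldl_nil]
    have hlen : (1 : Int).toNat < (List.replicate (n + 1).toNat (0 : Int)).length := by
      simp [List.length_replicate]; omega
    constructor
    · simp [a1, PySem.List.pySetD_of_nonneg, List.length_set, List.length_replicate]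
    constructor
    · simp [b1, PySem.List.pySetD_of_nonneg, List.length_set, List.length_replicate]
    constructor
    · rw [show a1 = (List.replicate (n + 1).toNat (0 : Int)).set (1 : Int).toNat 1 from
        PySem.List.pySetD_of_nonneg _ _ (by omega),
        PySem.List.pyGetD_eq_getElem _ _ (by omega) (by simp [List.length_set, List.length_replicate]; omega)]
      simp
    · rw [show b1 = (List.replicate (n + 1).toNat (0 : Int)).set (1 : Int).toNat 1 from
        PySem.List.pySetD_of_nonneg _ _ (by omega),
        PySem.List.pyGetD_eq_getElem _ _ (by omega) (by simp [List.length_set, List.length_replicate]; omega)]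
      simp
  | succ j hj1 ih =>
    have hjn : j ≤ n := by omega
    obtain ⟨hla, hlb, ha, hb⟩ := ih hjn
    have hsplit : PySem.List.pyRange 2 (j + 1 + 1) 1
        = PySem.List.pyRange 2 (j + 1) 1 ++ [j + 1] :=
      PySem.List.pyRange_one_succ_right (by omega)
    set st := (PySem.List.pyRange 2 (j + 1) 1).foldl pvStepA (a1, b1) with hst
    have hfold : (PySem.List.pyRange 2 (j + 1 + 1) 1).foldl pvStepA (a1, b1)
        = pvStepA st (j + 1) := by
      rw [hsplit, List.foldl_append, List.foldl_cons, List.foldl_nil]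
    rw [hfold]
    have hread1 : PySem.List.pyGetD st.1 (j + 1 - 1) 0 = (Nat.fib (j.toNat + 1) : Int) := by
      simpa using ha
    have hread2 : PySem.List.pyGetD st.2 (j + 1 - 1) 0 = (Nat.fib j.toNat : Int) := by
      simpa using hb
    have hidx : (j + 1).toNat < (n + 1).toNat := by omega
    have hset1 : PySem.List.pySetD st.1 (j + 1) (PySem.List.pyGetD st.1 (j + 1 - 1) 0 + PySem.List.pyGetD st.2 (j + 1 - 1) 0)
        = st.1.set (j + 1).toNat _ := PySem.List.pySetD_of_nonneg _ _ (by omega)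
    have hset2 : PySem.List.pySetD st.2 (j + 1) (PySem.List.pyGetD st.1 (j + 1 - 1) 0)
        = st.2.set (j + 1).toNat _ := PySem.List.pySetD_of_nonneg _ _ (by omega)
    simp only [pvStepA, hset1, hset2]
    refine ⟨by simp [List.length_set, hla], by simp [List.length_set, hlb], ?_, ?_⟩
    · rw [PySem.List.pyGetD_eq_getElem _ _ (by omega) (by simp [List.length_set, hla]; omega)]
      rw [List.getElem_set_self (by simp [List.length_set, hla]; omega)]
      rw [hread1, hread2]
      have : (j + 1).toNat + 1 = j.toNat + 2 := by omega
      rw [this, Nat.fib_add_two]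
      push_cast; ring
    · rw [PySem.List.pyGetD_eq_getElem _ _ (by omega) (by simp [List.length_set, hlb]; omega)]
      rw [List.getElem_set_self (by simp [List.length_set, hlb]; omega)]
      rw [hread1, show (j + 1).toNat = j.toNat + 1 from by omega]

-- ===== VERDICT (by name: the statement is the Claim_ definition above) =====
theorem countConsec_spec : Claim_equal_countConsec := by
  intro n _
  unfold Spec_countConsec countConsec countConsec_alt
  by_cases h : n < 2
  · simp [h]
  · simp only [if_neg h]
    have hn : 2 ≤ n := by omega
    obtain ⟨hla, hlb, ha, hb⟩ := pvLoopA_inv n hn n (by omega) (le_refl n)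
    rw [ha, hb, fibPair_eq]
    have h2 : (n + 2).toNat = n.toNat + 2 := by omega
    rw [h2, Nat.fib_add_two]
    have h1 : n.toNat + 1 = (n.toNat + 1) := rfl
    push_cast
    ring
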